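-- pv_equiv track=rewrite | github.com/QianfengWen/2D_ARC_Diffusion | scripts/make_arc_episodes_offline.py | pad_to_square_center
-- ===== SOURCE A (Python) =====
-- def pad_to_square_center(grid, size: int):
--     h, w = len(grid), len(grid[0])
--     assert h <= size and w <= size, f"{h}x{w} > target {size}"
--     top = (size - h) // 2
--     left = (size - w) // 2
--     out = [[0 for _ in range(size)] for _ in range(size)]
--     for r in range(h):
--         for c in range(w):
--             out[top + r][left + c] = grid[r][c]
--     return out
-- ===== SOURCE B (Python) =====
-- def pad_to_square_center(grid, size: int):
--     h, w = len(grid), len(grid[0])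
--     assert h <= size and w <= size, f"{h}x{w} > target {size}"
--     top = (size - h) // 2
--     left = (size - w) // 2
--     return [[grid[i - top][j - left]
--              if top <= i < top + h and left <= j < left + w else 0
--              for j in range(size)]
--             for i in range(size)]
-- ===== Notes on version B (the rewrite author's own statement) =====
-- stated objective: alternative
-- what changed: B computes each output cell directly from its coordinates by closed-form index arithmetic (grid[i-top][j-left] when (i,j) lies in the centered window, else 0) in one nested comprehension, instead of preallocating a size x size zero matrix and mutating cells by double indexing.
import Mathlib
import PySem

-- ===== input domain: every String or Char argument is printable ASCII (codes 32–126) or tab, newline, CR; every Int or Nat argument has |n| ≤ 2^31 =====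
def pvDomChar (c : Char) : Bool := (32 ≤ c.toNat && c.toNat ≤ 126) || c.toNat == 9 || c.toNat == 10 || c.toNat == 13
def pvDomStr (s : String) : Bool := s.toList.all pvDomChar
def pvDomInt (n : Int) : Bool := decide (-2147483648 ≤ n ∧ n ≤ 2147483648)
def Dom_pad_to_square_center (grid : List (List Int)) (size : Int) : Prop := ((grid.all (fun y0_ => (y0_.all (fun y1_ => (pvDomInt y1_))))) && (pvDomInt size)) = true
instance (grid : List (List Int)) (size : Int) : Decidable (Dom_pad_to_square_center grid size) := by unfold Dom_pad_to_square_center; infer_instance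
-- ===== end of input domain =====

-- B computes each output cell directly from its coordinates by closed-form index arithmetic
-- (grid[i-top][j-left] when (i,j) is inside the centered window, else 0), instead of
-- preallocating a size×size zero matrix and mutating cells (objective: alternative).


-- ===== PORT A =====
-- Literal transliteration: h = len(grid); w = len(grid[0]) (grid ≠ [] is in Pre_); the assert
-- becomes the `if` guard (the false branch is outside Pre_); out is the preallocated zero
-- matrix; the two nested `for` loops become nested folds over List.range that overwrite one
-- cell at a time (out[top+r][left+c] = grid[r][c], via List.modify/List.set; the indices are
-- nonnegative and in range under Pre_, so .toNat and getD are exact there).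
def pad_to_square_center (grid : List (List Int)) (size : Int) : List (List Int) :=
  let h : Int := grid.length
  let w : Int := (grid.headD []).length
  if h ≤ size ∧ w ≤ size then
    let top : Int := PySem.Int.floordiv (size - h) 2
    let left : Int := PySem.Int.floordiv (size - w) 2
    (List.range grid.length).foldl
      (fun out (r : Nat) =>
        (List.range (grid.headD []).length).foldl
          (fun out (c : Nat) =>
            out.modify (top + (r : Int)).toNat
              (fun row => row.set (left + (c : Int)).toNat ((grid.getD r []).getD c 0)))
          out)
      (List.replicate size.toNat (List.replicate size.toNat 0))
  else []

-- ===== PORT B =====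
-- Literal transliteration of Source B: one nested comprehension over range(size)×range(size);
-- each cell is grid[i-top][j-left] when the window condition holds, else 0 (the condition
-- guarantees the indices are nonnegative and in range under Pre_, so .toNat/getD are exact).
def pad_to_square_center_alt (grid : List (List Int)) (size : Int) : List (List Int) :=
  let h : Int := grid.length
  let w : Int := (grid.headD []).length
  if h ≤ size ∧ w ≤ size then
    let top : Int := PySem.Int.floordiv (size - h) 2
    let left : Int := PySem.Int.floordiv (size - w) 2
    (List.range size.toNat).map (fun (i : Nat) =>
      (List.range size.toNat).map (fun (j : Nat) =>
        if top ≤ (i : Int) ∧ (i : Int) < top + h ∧ left ≤ (j : Int) ∧ (j : Int) < left + w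
        then (grid.getD ((i : Int) - top).toNat []).getD ((j : Int) - left).toNat 0
        else 0))
  else []

-- ===== PRECONDITION & SPEC =====
-- Pre_ excludes exactly the inputs where Python A raises: the empty grid (grid[0] is an
-- IndexError), the failing assert h ≤ size ∧ w ≤ size, and ragged grids with a row shorter
-- than the first row (grid[r][c] is an IndexError).  A returns on everything else.
def Pre_pad_to_square_center (grid : List (List Int)) (size : Int) : Prop :=
  grid ≠ [] ∧ (grid.length : Int) ≤ size ∧ ((grid.headD []).length : Int) ≤ size ∧
    ∀ row ∈ grid, (grid.headD []).length ≤ row.length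
instance (grid : List (List Int)) (size : Int) : Decidable (Pre_pad_to_square_center grid size) := by
  unfold Pre_pad_to_square_center; infer_instance

def pvWitness_pad_to_square_center : List (List Int) × Int := ([[7, 8], [9, 10]], 4)

def Spec_pad_to_square_center (grid : List (List Int)) (size : Int) (out : List (List Int)) : Prop := out = pad_to_square_center_alt grid size
instance (grid : List (List Int)) (size : Int) (out : List (List Int)) : Decidable (Spec_pad_to_square_center grid size out) := by unfold Spec_pad_to_square_center; infer_instance

-- ===== CLAIM (what is proved, stated in full; the proofs are below) =====
def Claim_equal_pad_to_square_center : Prop := ∀ (grid : List (List Int)) (size : Int), Dom_pad_to_square_center grid size → Pre_pad_to_square_center grid size → Spec_pad_to_square_center grid size (pad_to_square_center grid size)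

-- ===== LEMMAS AND PROOFS =====

-- Setting position l1.length in a middle-split list hits the head of the tail.
theorem pv_set_append_cons {l1 l2 : List Int} {x v : Int} :
    (l1 ++ x :: l2).set l1.length v = l1 ++ v :: l2 := by
  rw [List.set_append_right _ _ (le_refl _)]
  simp

-- Same for List.modify.
theorem pv_modify_append_cons {l1 l2 : List (List Int)} {x : List Int}
    {f : List Int → List Int} :
    (l1 ++ x :: l2).modify l1.length f = l1 ++ f x :: l2 := by
  rw [List.modify_eq_set]
  have hx : (l1 ++ x :: l2)[l1.length]?.getD default = x := by simp
  rw [hx, List.set_append_right _ _ (le_refl _)]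
  simp

theorem pv_modify_id (l : List (List Int)) (i : Nat) : l.modify i (fun x => x) = l := by
  apply List.ext_getElem
  · simp [List.length_modify]
  · intro j h1 h2
    simp [List.getElem_modify]

theorem pv_modify_modify (l : List (List Int)) (i : Nat) (f g : List Int → List Int) :
    (l.modify i f).modify i g = l.modify i (fun x => g (f x)) := by
  apply List.ext_getElem
  · simp [List.length_modify]
  · intro j h1 h2
    by_cases hij : i = j <;> simp [hij]

-- A loop whose every step modifies the SAME row index is one modify by the folded function.
theorem pv_foldl_modify (i : Nat) (g : List Int → Nat → List Int) (l : List Nat)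
    (acc : List (List Int)) :
    l.foldl (fun o c => o.modify i (fun row => g row c)) acc
      = acc.modify i (fun row => l.foldl g row) := by
  induction l generalizing acc with
  | nil => simp [pv_modify_id]
  | cons c l ih => rw [List.foldl_cons, ih, pv_modify_modify]; rfl

-- A's inner loop: folding single-cell writes over range W replaces the middle segment of row.
theorem pv_inner_loop (g : Nat → Int) (L : Nat) (W : Nat) (row : List Int)
    (h : L + W ≤ row.length) :
    (List.range W).foldl (fun acc c => acc.set (L + c) (g c)) row
      = row.take L ++ (List.range W).map g ++ row.drop (L + W) := by
  induction W with
  | zero => simp [List.take_append_drop]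
  | succ W ih =>
    rw [List.range_succ, List.foldl_append, ih (by omega)]
    have hd : row.drop (L + W) = row[L + W]! :: row.drop (L + W + 1) := by
      rw [List.getElem!_eq_getElem?_getD,
        List.getElem?_eq_getElem (by omega : L + W < row.length)]
      exact List.drop_eq_getElem_cons (by omega)
    have hlen : L + W = (row.take L ++ (List.range W).map g).length := by
      simp [List.length_take]; omega
    have hset := pv_set_append_cons (l1 := row.take L ++ (List.range W).map g)
      (l2 := row.drop (L + W + 1)) (x := row[L + W]!) (v := g W)
    rw [← hlen] at hset
    rw [List.foldl_cons, List.foldl_nil, hd, hset]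
    simp [Nat.add_assoc]

-- A's outer loop: folding row-modifies at indices T+r replaces the middle rows.
theorem pv_outer_loop (F : Nat → List Int → List Int) (T : Nat) (H : Nat)
    (out : List (List Int)) (h : T + H ≤ out.length) :
    (List.range H).foldl (fun o r => o.modify (T + r) (F r)) out
      = out.take T ++ (List.range H).map (fun r => F r (out.getD (T + r) []))
          ++ out.drop (T + H) := by
  induction H with
  | zero => simp [List.take_append_drop]
  | succ H ih =>
    rw [List.range_succ, List.foldl_append, ih (by omega)]
    have hd : out.drop (T + H) = out[T + H]! :: out.drop (T + H + 1) := by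
      rw [List.getElem!_eq_getElem?_getD,
        List.getElem?_eq_getElem (by omega : T + H < out.length)]
      exact List.drop_eq_getElem_cons (by omega)
    have hlen : T + H
        = (out.take T ++ (List.range H).map (fun r => F r (out.getD (T + r) []))).length := by
      simp [List.length_take]; omega
    have hmod := pv_modify_append_cons
      (l1 := out.take T ++ (List.range H).map (fun r => F r (out.getD (T + r) [])))
      (l2 := out.drop (T + H + 1)) (x := out[T + H]!) (f := F H)
    rw [← hlen] at hmod
    rw [List.foldl_cons, List.foldl_nil, hd, hmod]
    have hob : out[T + H]! = out.getD (T + H) [] := by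
      rw [List.getElem!_eq_getElem?_getD,
        List.getElem?_eq_getElem (by omega : T + H < out.length),
        List.getD_eq_getElem _ _ (by omega : T + H < out.length)]
      rfl
    simp [hob, Nat.add_assoc]

-- Mapping a function of grid[r] over range (len grid) is mapping over grid.
theorem pv_map_range_getD (grid : List (List Int)) (f : List Int → List Int) :
    (List.range grid.length).map (fun r => f (grid.getD r [])) = grid.map f := by
  apply List.ext_getElem
  · simp
  · intro i h1 h2
    simp at h1 ⊢
    rw [List.getElem?_eq_getElem (by simpa using h1 : i < grid.length)]
    rfl

-- A map over range S whose values are z outside a middle window splits into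
-- replicate ++ map ++ replicate.
theorem pv_range_map_split {α : Type} (S Lo n : Nat) (z : α) (f g : Nat → α)
    (hle : Lo + n ≤ S)
    (h1 : ∀ k, k < Lo → f k = z)
    (h2 : ∀ c, c < n → f (Lo + c) = g c)
    (h3 : ∀ k, Lo + n ≤ k → k < S → f k = z) :
    (List.range S).map f
      = List.replicate Lo z ++ (List.range n).map g ++ List.replicate (S - (Lo + n)) z := by
  apply List.ext_getElem
  · simp; omega
  · intro k hk1 hk2
    simp only [List.getElem_map, List.getElem_range]
    by_cases hA : k < Lo
    · rw [List.getElem_append_left (by simp; omega),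
        List.getElem_append_left (by simp; omega)]
      simp [h1 k hA]
    · by_cases hB : k < Lo + n
      · rw [List.getElem_append_left (by simp; omega),
          List.getElem_append_right (by simp; omega)]
        simp only [List.getElem_map, List.getElem_range, List.length_replicate]
        rw [← h2 (k - Lo) (by omega)]
        congr 1
        omega
      · rw [List.getElem_append_right (by simp; omega)]
        simp [h3 k (by omega) (by simpa using hk1)]

-- ===== VERDICT (by name: the statement is the Claim_ definition above) =====
theorem pad_to_square_center_spec : Claim_equal_pad_to_square_center := by
  intro grid size _hdom hpre
  obtain ⟨hne, hh, hw, hrows⟩ := hpre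
  unfold Spec_pad_to_square_center pad_to_square_center pad_to_square_center_alt
  rw [if_pos ⟨hh, hw⟩, if_pos ⟨hh, hw⟩]
  rw [PySem.Int.floordiv_eq_ediv_of_pos (by norm_num),
    PySem.Int.floordiv_eq_ediv_of_pos (by norm_num)]
  set H := grid.length with hH
  set W := (grid.headD []).length with hW
  have hH1 : 1 ≤ H := by
    cases grid with
    | nil => exact absurd rfl hne
    | cons a l => simp [hH]
  set top : Int := (size - (H : Int)) / 2 with htop
  set left : Int := (size - (W : Int)) / 2 with hleft
  set S := size.toNat with hS
  set T := top.toNat with hT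
  set L := left.toNat with hL
  have hTH : T + H ≤ S := by omega
  have hLW : L + W ≤ S := by omega
  -- A's side equals the canonical form
  have hAside :
      (List.range H).foldl
        (fun out (r : Nat) =>
          (List.range W).foldl
            (fun out (c : Nat) =>
              out.modify (top + (r : Int)).toNat
                (fun row => row.set (left + (c : Int)).toNat ((grid.getD r []).getD c 0)))
            out)
        (List.replicate S (List.replicate S 0))
      = List.replicate T (List.replicate S 0)
          ++ grid.map (fun row =>
               List.replicate L 0 ++ (List.range W).map (fun c => row.getD c 0)
                 ++ List.replicate (S - (L + W)) 0)
          ++ List.replicate (S - (T + H)) (List.replicate S 0) := by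
    have houter :
        (List.range H).foldl
          (fun out (r : Nat) =>
            (List.range W).foldl
              (fun out (c : Nat) =>
                out.modify (top + (r : Int)).toNat
                  (fun row => row.set (left + (c : Int)).toNat ((grid.getD r []).getD c 0)))
              out)
          (List.replicate S (List.replicate S 0))
        = (List.range H).foldl
            (fun out r => out.modify (T + r)
              (fun row => (List.range W).foldl
                (fun acc c => acc.set (L + c) ((grid.getD r []).getD c 0)) row))
            (List.replicate S (List.replicate S 0)) := by
      apply PySem.List.foldl_congr_mem
      intro acc r hr
      have hrH : r < H := List.mem_range.mp hr
      have h1 : (List.range W).foldl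
          (fun out (c : Nat) =>
            out.modify (top + (r : Int)).toNat
              (fun row => row.set (left + (c : Int)).toNat ((grid.getD r []).getD c 0)))
          acc
          = (List.range W).foldl
              (fun out c => out.modify (T + r)
                (fun row => row.set (L + c) ((grid.getD r []).getD c 0))) acc := by
        apply PySem.List.foldl_congr_mem
        intro acc2 c hc
        have hcW : c < W := List.mem_range.mp hc
        rw [show (left + (c : Int)).toNat = L + c by omega,
          show (top + (r : Int)).toNat = T + r by omega]
      rw [h1, pv_foldl_modify]
    rw [houter,
      pv_outer_loop (fun r row => (List.range W).foldl
        (fun acc c => acc.set (L + c) ((grid.getD r []).getD c 0)) row) T H _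
        (by simp; omega)]
    have hmid : (List.range H).map
        (fun r => (List.range W).foldl
          (fun acc c => acc.set (L + c) ((grid.getD r []).getD c 0))
          ((List.replicate S (List.replicate S (0 : Int))).getD (T + r) []))
        = grid.map (fun row =>
            List.replicate L 0 ++ (List.range W).map (fun c => row.getD c 0)
              ++ List.replicate (S - (L + W)) 0) := by
      rw [← pv_map_range_getD grid]
      apply List.map_congr_left
      intro r hr
      have hrH : r < H := List.mem_range.mp hr
      have hz : (List.replicate S (List.replicate S (0 : Int))).getD (T + r) []
          = List.replicate S 0 := by
        rw [List.getD_eq_getElem _ _ (by simp; omega), List.getElem_replicate]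
      rw [hz, pv_inner_loop _ L W _ (by simp; omega)]
      simp [List.take_replicate, List.drop_replicate, Nat.min_eq_left (show L ≤ S by omega)]
    rw [hmid]
    simp only [List.take_replicate, List.drop_replicate]
    rw [Nat.min_eq_left (show T ≤ S by omega)]
  -- B's side equals the same canonical form
  have hBside :
      (List.range S).map (fun (i : Nat) =>
        (List.range S).map (fun (j : Nat) =>
          if top ≤ (i : Int) ∧ (i : Int) < top + (H : Int) ∧ left ≤ (j : Int)
              ∧ (j : Int) < left + (W : Int)
          then (grid.getD ((i : Int) - top).toNat []).getD ((j : Int) - left).toNat 0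
          else 0))
      = List.replicate T (List.replicate S 0)
          ++ grid.map (fun row =>
               List.replicate L 0 ++ (List.range W).map (fun c => row.getD c 0)
                 ++ List.replicate (S - (L + W)) 0)
          ++ List.replicate (S - (T + H)) (List.replicate S 0) := by
    rw [← pv_map_range_getD grid]
    apply pv_range_map_split S T H _ _ _ hTH
    · intro k hk
      have : ∀ j : Nat, ¬ (top ≤ (k : Int) ∧ (k : Int) < top + (H : Int) ∧ left ≤ (j : Int)
          ∧ (j : Int) < left + (W : Int)) := by
        intro j hj; omega
      calc (List.range S).map (fun (j : Nat) =>
              if top ≤ (k : Int) ∧ (k : Int) < top + (H : Int) ∧ left ≤ (j : Int)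
                  ∧ (j : Int) < left + (W : Int)
              then (grid.getD ((k : Int) - top).toNat []).getD ((j : Int) - left).toNat 0
              else 0)
          = (List.range S).map (fun _ => (0 : Int)) := by
            apply List.map_congr_left; intro j _; rw [if_neg (this j)]
        _ = List.replicate S 0 := by simp [List.map_const']
    · intro r hr
      apply pv_range_map_split S L W _ _ _ hLW
      · intro k hk
        rw [if_neg (by omega)]
      · intro c hc
        rw [if_pos (by constructor; omega; constructor; omega; constructor; omega; omega)]
        rw [show ((T + r : Nat) : Int) - top = (r : Int) by omega,
          show ((L + c : Nat) : Int) - left = (c : Int) by omega]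
        simp
      · intro k hk1 hk2
        rw [if_neg (by omega)]
    · intro k hk1 hk2
      have : ∀ j : Nat, ¬ (top ≤ (k : Int) ∧ (k : Int) < top + (H : Int) ∧ left ≤ (j : Int)
          ∧ (j : Int) < left + (W : Int)) := by
        intro j hj; omega
      calc (List.range S).map (fun (j : Nat) =>
              if top ≤ (k : Int) ∧ (k : Int) < top + (H : Int) ∧ left ≤ (j : Int)
                  ∧ (j : Int) < left + (W : Int)
              then (grid.getD ((k : Int) - top).toNat []).getD ((j : Int) - left).toNat 0
              else 0)
          = (List.range S).map (fun _ => (0 : Int)) := by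
            apply List.map_congr_left; intro j _; rw [if_neg (this j)]
        _ = List.replicate S 0 := by simp [List.map_const']
  rw [hAside, hBside]
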